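-- pv_equiv track=rewrite | github.com/zhenghaohui/tyan | tyan_cxx_parser/tyan_cxx_parser.py | found_op
-- ===== SOURCE A (Python) =====
-- def extract_skeleton(line: str) -> str:
--     result = ""
--     for chr in line:
--         if chr == '#' or chr == "'" or chr == '(' or chr == "{":
--             break
--         result += chr
--     result += " "
--     return result
--
-- def found_op(line: str, op: str) -> bool:
--     seems_str_pos = line.find('\"')
--     if seems_str_pos != -1:
--         if seems_str_pos < line.find(op):
--             return False
--     line = extract_skeleton(line)
--     if len(line) <= len(op) + 2:
--         return False
--     for idx in range(0, len(line)):
--         if idx + 1 + len(op) + 1 > len(line):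
--             break
--         if line[idx] in "+-=":
--             continue
--         if line[idx + 1:idx + 1 + len(op)] != op:
--             continue
--         if line[idx + 1 + len(op)] in "+-=":
--             continue
--         return True
--     return False
-- ===== SOURCE B (Python) =====
-- import re
--
-- def found_op(line: str, op: str) -> bool:
--     seems_str_pos = line.find('"')
--     if seems_str_pos != -1:
--         if seems_str_pos < line.find(op):
--             return False
--     skeleton = re.split(r"[#'({]", line, maxsplit=1)[0] + " "
--     if len(skeleton) <= len(op) + 2:
--         return False
--     return re.search("[^+=-]" + re.escape(op) + "[^+=-]", skeleton) is not None
-- ===== Notes on version B (the rewrite author's own statement) =====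
-- stated objective: idiomatic
-- what changed: B drops A's character-by-character skeleton rebuild and its per-index scan that slices and compares op at every position; instead it cuts the skeleton with one maxsplit-1 regex split and decides the whole occurrence question with a single re.search of the literal pattern [^+=-]op[^+=-].
import Mathlib
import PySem

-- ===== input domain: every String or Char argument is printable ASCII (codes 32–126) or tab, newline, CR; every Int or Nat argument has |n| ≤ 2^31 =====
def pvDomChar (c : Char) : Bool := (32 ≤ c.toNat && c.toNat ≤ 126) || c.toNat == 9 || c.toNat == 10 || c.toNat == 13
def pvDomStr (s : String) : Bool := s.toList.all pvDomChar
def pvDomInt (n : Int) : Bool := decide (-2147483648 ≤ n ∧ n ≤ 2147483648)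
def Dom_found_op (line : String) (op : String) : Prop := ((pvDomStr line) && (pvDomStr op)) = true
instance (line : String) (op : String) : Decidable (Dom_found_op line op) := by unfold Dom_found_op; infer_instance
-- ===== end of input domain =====

-- B replaces A's per-index scan+slice loop by a single regex search `[^+=-]op[^+=-]` on the
-- skeleton (and computes the skeleton with a maxsplit-1 regex split instead of a char loop);
-- objective: idiomatic, same behaviour.


-- ===== PORT A =====

-- `c in "+-="`
def pvPlusMinusEq (c : Char) : Bool := c = '+' || c = '-' || c = '='

-- extract_skeleton: char loop with break on '#', '\'', '(', '{', then `result += " "`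
def pvExtractSkeleton : List Char → List Char
  | [] => [' ']
  | c :: rest =>
    if c = '#' || c = '\'' || c = '(' || c = '{' then [' ']
    else c :: pvExtractSkeleton rest

-- the `for idx in range(0, len(line))` loop of A, with its break/continue structure
def pvLoopA (sk o : List Char) (idx : Nat) : Bool :=
  if _h1 : sk.length ≤ idx then false                      -- range exhausted
  else if sk.length < idx + 1 + o.length + 1 then false    -- break
  else if pvPlusMinusEq (PySem.List.pyGetD sk (idx : Int) ' ') then pvLoopA sk o (idx + 1)
  else if PySem.List.slice sk (some ((idx : Int) + 1)) (some ((idx : Int) + 1 + o.length)) ≠ o then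
    pvLoopA sk o (idx + 1)
  else if pvPlusMinusEq (PySem.List.pyGetD sk ((idx : Int) + 1 + o.length) ' ') then pvLoopA sk o (idx + 1)
  else true
termination_by sk.length - idx
decreasing_by all_goals omega

def found_op (line : String) (op : String) : Bool :=
  let l := line.toList
  let o := op.toList
  let seems_str_pos := PySem.Chars.find l ['"']
  if seems_str_pos ≠ -1 ∧ seems_str_pos < PySem.Chars.find l o then false
  else
    let sk := pvExtractSkeleton l
    if sk.length ≤ o.length + 2 then false
    else pvLoopA sk o 0

-- ===== PORT B =====

-- `c` matches the regex class `[^+=-]`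
def pvNotOpChar (c : Char) : Bool := !(c = '+' || c = '=' || c = '-')

-- the regex `[^+=-]<escaped op>[^+=-]` matches at the START of `c :: rest`:
-- `c` in the class, then the literal `op`, then one more class character.
-- Exact semantics of the (purely literal) pattern re.escape builds here.
def pvReMatchHere (o : List Char) (c : Char) (rest : List Char) : Bool :=
  if pvNotOpChar c then
    if o.isPrefixOf rest then
      match rest.drop o.length with
      | [] => false
      | d :: _ => pvNotOpChar d
    else false
  else false

-- re.search: try the pattern at each successive start position; true iff some start matches.
def pvReSearch (o : List Char) : List Char → Bool
  | [] => false
  | c :: rest => pvReMatchHere o c rest || pvReSearch o rest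

def found_op_alt (line : String) (op : String) : Bool :=
  let l := line.toList
  let o := op.toList
  let seems_str_pos := PySem.Chars.find l ['"']
  if seems_str_pos ≠ -1 ∧ seems_str_pos < PySem.Chars.find l o then false
  else
    -- re.split(r"[#'({]", line, maxsplit=1)[0]: everything before the first class char
    let sk := l.takeWhile (fun c => !(c = '#' || c = '\'' || c = '(' || c = '{')) ++ [' ']
    if sk.length ≤ o.length + 2 then false
    else pvReSearch o sk

-- ===== PRECONDITION & SPEC =====
def Spec_found_op (line : String) (op : String) (out : Bool) : Prop := out = found_op_alt line op
instance (line : String) (op : String) (out : Bool) : Decidable (Spec_found_op line op out) := by unfold Spec_found_op; infer_instance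

-- ===== CLAIM (what is proved, stated in full; the proofs are below) =====
def Claim_equal_found_op : Prop := ∀ (line : String) (op : String), Dom_found_op line op → Spec_found_op line op (found_op line op)

-- ===== LEMMAS AND PROOFS =====

-- A "good" position p: an occurrence of o at p whose neighbours exist and are not in "+-=".
def pvGood (sk o : List Char) (p : Nat) : Prop :=
  1 ≤ p ∧ p + o.length < sk.length ∧
  pvPlusMinusEq (sk.getD (p - 1) ' ') = false ∧
  o <+: sk.drop p ∧
  pvPlusMinusEq (sk.getD (p + o.length) ' ') = false

theorem pvSkeleton_eq (l : List Char) :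
    pvExtractSkeleton l =
      l.takeWhile (fun c => !(c = '#' || c = '\'' || c = '(' || c = '{')) ++ [' '] := by
  induction l with
  | nil => simp [pvExtractSkeleton]
  | cons c rest ih =>
    rw [pvExtractSkeleton.eq_2, List.takeWhile_cons]
    cases hb : (c = '#' || c = '\'' || c = '(' || c = '{') with
    | true => simp
    | false => simp [ih]

theorem pvLoopA_iff (sk o : List Char) (idx : Nat) :
    pvLoopA sk o idx = true ↔ ∃ p, idx + 1 ≤ p ∧ pvGood sk o p := by
  rw [pvLoopA]
  by_cases h1 : sk.length ≤ idx
  · simp only [h1, dif_pos]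
    constructor
    · intro h; cases h
    · rintro ⟨p, hp, -, hlt, -⟩; omega
  · rw [dif_neg h1]
    by_cases h2 : sk.length < idx + 1 + o.length + 1
    · simp only [h2, if_true]
      constructor
      · intro h; cases h
      · rintro ⟨p, hp, -, hlt, -⟩; omega
    · rw [if_neg h2]
      have hslice : PySem.List.slice sk (some ((idx : Int) + 1)) (some ((idx : Int) + 1 + o.length)) =
          (sk.drop (idx + 1)).take o.length := by
        have : ((idx : Int) + 1) = ((idx + 1 : Nat) : Int) := by push_cast; ring
        rw [this]
        have : ((idx + 1 : Nat) : Int) + (o.length : Int) = (((idx + 1) + o.length : Nat) : Int) := by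
          push_cast; ring
        rw [this, PySem.List.slice_natCast]
        congr 1; omega
      have hocc : (PySem.List.slice sk (some ((idx : Int) + 1)) (some ((idx : Int) + 1 + o.length)) = o)
          ↔ o <+: sk.drop (idx + 1) := by
        rw [hslice]
        constructor
        · intro h
          simpa [h] using List.take_prefix o.length (sk.drop (idx + 1))
        · intro h
          rw [List.prefix_iff_eq_take] at h; exact h.symm
      have hget1 : PySem.List.pyGetD sk (idx : Int) ' ' = sk.getD idx ' ' :=
        PySem.List.pyGetD_natCast sk idx ' '
      have hget2 : PySem.List.pyGetD sk ((idx : Int) + 1 + o.length) ' ' = sk.getD (idx + 1 + o.length) ' ' := by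
        have : ((idx : Int) + 1 + o.length) = ((idx + 1 + o.length : Nat) : Int) := by push_cast; ring
        rw [this, PySem.List.pyGetD_natCast]
      have hnotGood : ∀ (c : pvPlusMinusEq (sk.getD idx ' ') = true ∨
            ¬ o <+: sk.drop (idx + 1) ∨ pvPlusMinusEq (sk.getD (idx + 1 + o.length) ' ') = true),
          (∃ p, idx + 1 + 1 ≤ p ∧ pvGood sk o p) ↔ (∃ p, idx + 1 ≤ p ∧ pvGood sk o p) := by
        intro hc
        constructor
        · rintro ⟨p, hp, hg⟩; exact ⟨p, by omega, hg⟩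
        · rintro ⟨p, hp, hg⟩
          refine ⟨p, ?_, hg⟩
          rcases Nat.lt_or_ge p (idx + 2) with hlt | hge
          · exfalso
            have hpe : p = idx + 1 := by omega
            obtain ⟨-, -, hc1, hpre, hc2⟩ := hg
            rw [hpe] at hc1 hpre hc2
            simp only [Nat.add_sub_cancel] at hc1
            rcases hc with h | h | h
            · rw [hc1] at h; cases h
            · exact h hpre
            · rw [hc2] at h; cases h
          · exact hge
      by_cases hc1 : pvPlusMinusEq (PySem.List.pyGetD sk (idx : Int) ' ') = true
      · rw [if_pos hc1, pvLoopA_iff]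
        exact hnotGood (Or.inl (hget1 ▸ hc1))
      · rw [if_neg hc1]
        by_cases hc2 : PySem.List.slice sk (some ((idx : Int) + 1)) (some ((idx : Int) + 1 + o.length)) ≠ o
        · rw [if_pos hc2, pvLoopA_iff]
          exact hnotGood (Or.inr (Or.inl (fun h => hc2 (hocc.mpr h))))
        · rw [if_neg hc2]
          replace hc2 := not_not.mp hc2
          by_cases hc3 : pvPlusMinusEq (PySem.List.pyGetD sk ((idx : Int) + 1 + o.length) ' ') = true
          · rw [if_pos hc3, pvLoopA_iff]
            exact hnotGood (Or.inr (Or.inr (hget2 ▸ hc3)))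
          · rw [if_neg hc3]
            simp only [true_iff]
            refine ⟨idx + 1, le_refl _, ?_, by omega, ?_, hocc.mp hc2, ?_⟩
            · omega
            · simpa [hget1] using Bool.eq_false_iff.mpr hc1
            · have := Bool.eq_false_iff.mpr hc3
              rwa [hget2] at this
termination_by sk.length - idx
decreasing_by all_goals omega

theorem pvNotOpChar_eq (c : Char) : pvNotOpChar c = !pvPlusMinusEq c := by
  unfold pvNotOpChar pvPlusMinusEq
  by_cases h1 : c = '+' <;> by_cases h2 : c = '-' <;> by_cases h3 : c = '=' <;>
    simp [h1, h2, h3]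

-- pvReSearch on the suffix sk.drop s finds exactly the good positions p > s.
theorem pvReSearch_drop (sk o : List Char) (s : Nat) (hs : s ≤ sk.length) :
    pvReSearch o (sk.drop s) = true ↔ ∃ p, s + 1 ≤ p ∧ pvGood sk o p := by
  rcases Nat.lt_or_ge s sk.length with hlt | hge
  · obtain ⟨c, hc⟩ : ∃ c, sk[s]? = some c := by
      exact ⟨sk[s], List.getElem?_eq_getElem hlt⟩
    have hdrop : sk.drop s = c :: sk.drop (s + 1) := by
      rw [List.drop_eq_getElem_cons hlt]
      simp [List.getElem?_eq_getElem hlt] at hc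
      simp [hc]
    rw [hdrop]
    have hcget : sk.getD s ' ' = c := by simp [List.getD_eq_getElem?_getD, hc]
    rw [pvReSearch]
    have ihh := pvReSearch_drop sk o (s + 1) (by omega)
    constructor
    · intro h
      cases hm : pvReMatchHere o c (sk.drop (s + 1)) with
      | false =>
        rw [hm] at h
        simp only [Bool.false_or] at h
        obtain ⟨p, hp, hg⟩ := ihh.mp h
        exact ⟨p, by omega, hg⟩
      | true =>
        -- the pattern matches right here: good position s + 1
        rw [pvReMatchHere] at hm
        by_cases hc1 : pvNotOpChar c = true
        · rw [if_pos hc1] at hm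
          by_cases hpp : o.isPrefixOf (sk.drop (s + 1)) = true
          · rw [if_pos hpp] at hm
            have hpre' : o <+: sk.drop (s + 1) := List.isPrefixOf_iff_prefix.mp hpp
            rcases hdd : (sk.drop (s + 1)).drop o.length with _ | ⟨d, tail⟩
            · rw [hdd] at hm; cases hm
            · rw [hdd] at hm
              have hm' : pvNotOpChar d = true := hm
              have hdd' : sk.drop (s + 1 + o.length) = d :: tail := by
                have h2 := hdd
                rw [List.drop_drop] at h2
                exact h2
              have hlen : s + 1 + o.length < sk.length := by
                have := congrArg List.length hdd'
                simp at this; omega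
              have hdget : sk.getD (s + 1 + o.length) ' ' = d := by
                have hsome : sk[s + 1 + o.length]? = some d := by
                  have h0 : (sk.drop (s + 1 + o.length))[0]? = sk[s + 1 + o.length + 0]? :=
                    List.getElem?_drop
                  rw [hdd'] at h0
                  simpa using h0.symm
                simp [List.getD_eq_getElem?_getD, hsome]
              refine ⟨s + 1, le_refl _, by omega, hlen, ?_, hpre', ?_⟩
              · simp only [Nat.add_sub_cancel, hcget]
                rw [pvNotOpChar_eq] at hc1; simpa using hc1
              · rw [hdget]
                rw [pvNotOpChar_eq] at hm'; simpa using hm'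
          · rw [if_neg hpp] at hm; cases hm
        · rw [if_neg hc1] at hm; cases hm
    · rintro ⟨p, hp, hg⟩
      rcases Nat.lt_or_ge p (s + 2) with hps | hps
      · -- p = s + 1: the pattern matches at the start
        have hpe : p = s + 1 := by omega
        obtain ⟨-, hplen, hg1, hpre, hg2⟩ := hg
        rw [hpe] at hplen hg1 hpre hg2
        simp only [Nat.add_sub_cancel] at hg1
        have hm : pvReMatchHere o c (sk.drop (s + 1)) = true := by
          rw [pvReMatchHere]
          rw [if_pos (show pvNotOpChar c = true by
            rw [pvNotOpChar_eq, ← hcget, hg1]; rfl)]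
          rw [if_pos (List.isPrefixOf_iff_prefix.mpr hpre)]
          have hdd' : (sk.drop (s + 1)).drop o.length = sk.drop (s + 1 + o.length) := by
            rw [List.drop_drop]
          rw [hdd', List.drop_eq_getElem_cons hplen]
          have hdget : sk.getD (s + 1 + o.length) ' ' = sk[s + 1 + o.length] := by
            simp [List.getD_eq_getElem?_getD, List.getElem?_eq_getElem hplen]
          show pvNotOpChar (sk[s + 1 + o.length]) = true
          rw [pvNotOpChar_eq, ← hdget, hg2]; rfl
        rw [hm]; simp
      · have hb := ihh.mpr ⟨p, by omega, hg⟩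
        rw [hb]; simp
  · have : sk.drop s = [] := List.drop_eq_nil_of_le hge
    rw [this]
    constructor
    · intro h; cases h
    · rintro ⟨p, hp, -, hplen, -⟩; omega
termination_by sk.length - s
decreasing_by omega

-- ===== VERDICT (by name: the statement is the Claim_ definition above) =====
theorem found_op_spec : Claim_equal_found_op := by
  intro line op _hdom
  unfold Spec_found_op found_op found_op_alt
  simp only []
  by_cases h1 : PySem.Chars.find line.toList ['"'] ≠ -1 ∧
      PySem.Chars.find line.toList ['"'] < PySem.Chars.find line.toList op.toList
  · rw [if_pos h1, if_pos h1]
  · rw [if_neg h1, if_neg h1, pvSkeleton_eq]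
    set sk := line.toList.takeWhile (fun c => !(c = '#' || c = '\'' || c = '(' || c = '{')) ++ [' '] with hsk
    by_cases h2 : sk.length ≤ op.toList.length + 2
    · rw [if_pos h2, if_pos h2]
    · rw [if_neg h2, if_neg h2]
      rw [Bool.eq_iff_iff, pvLoopA_iff]
      have := pvReSearch_drop sk op.toList 0 (by omega)
      simp only [List.drop_zero, Nat.zero_add] at this
      rw [this]
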